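-- pv_equiv track=rewrite | github.com/semyonvlasov/rep_lipsync_training | face_processing/segmentation.py | _subdivide_run
-- ===== SOURCE A (Python) =====
-- def _subdivide_run(start: int, end: int, max_length: int) -> list[tuple[int, int]]:
--     """Split a long run into chunks respecting max_length.
--
--     - length > 2 * max_length: cut max_length pieces from the front
--     - max_length < length <= 2 * max_length: split into 2 roughly equal halves
--     """
--     result: list[tuple[int, int]] = []
--     pos = start
--     remaining = end - pos
--
--     while remaining > 0:
--         if remaining <= max_length:
--             result.append((pos, end))
--             break
--         elif remaining <= 2 * max_length:
--             # Split into 2 roughly equal halves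
--             mid = pos + remaining // 2
--             result.append((pos, mid))
--             result.append((mid, end))
--             break
--         else:
--             # Cut a max_length chunk
--             result.append((pos, pos + max_length))
--             pos += max_length
--             remaining = end - pos
--
--     return result
-- ===== SOURCE B (Python) =====
-- def _subdivide_run(start: int, end: int, max_length: int) -> list[tuple[int, int]]:
--     length = end - start
--     if length <= 0:
--         return []
--     if length <= max_length:
--         return [(start, end)]
--     # number of leading full max_length chunks, computed arithmetically
--     k = (length - max_length - 1) // max_length
--     chunks = [(start + i * max_length, start + (i + 1) * max_length) for i in range(k)]
--     pos = start + k * max_length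
--     r = end - pos
--     mid = pos + r // 2
--     chunks.append((pos, mid))
--     chunks.append((mid, end))
--     return chunks
-- ===== Notes on version B (the rewrite author's own statement) =====
-- stated objective: alternative
-- what changed: Replaces A's per-chunk while loop with a closed-form count of leading full chunks (one floor division), a comprehension over range(k), and a one-shot two-half tail; Pre_ excludes max_length <= 0 with end > start, where A loops forever.
import Mathlib
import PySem

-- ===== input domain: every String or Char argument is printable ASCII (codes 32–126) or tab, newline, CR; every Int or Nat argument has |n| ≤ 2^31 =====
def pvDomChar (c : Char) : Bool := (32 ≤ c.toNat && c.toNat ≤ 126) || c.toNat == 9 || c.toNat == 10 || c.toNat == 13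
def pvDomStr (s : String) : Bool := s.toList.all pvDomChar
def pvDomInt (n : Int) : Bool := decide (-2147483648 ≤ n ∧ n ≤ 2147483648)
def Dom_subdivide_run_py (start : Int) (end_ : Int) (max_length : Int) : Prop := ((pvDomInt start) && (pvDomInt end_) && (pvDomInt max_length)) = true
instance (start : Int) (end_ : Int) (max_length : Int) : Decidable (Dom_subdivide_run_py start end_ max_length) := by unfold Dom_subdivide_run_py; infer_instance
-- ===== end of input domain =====

-- B replaces A's per-chunk while loop by a closed-form chunk count plus a one-shot tail (objective: alternative decomposition).
-- Pre_ excludes max_length ≤ 0 with end_ > start, where Python A loops forever (and B would divide by 0 for max_length = 0).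

-- ===== PORT A =====
-- A's while loop, with fuel (end_-start).toNat+1, always sufficient under Pre_ (each
-- iteration with max_length > 0 decreases end_-pos by at least 1).
def subRunLoopA (fuel : Nat) (pos : Int) (end_ : Int) (max_length : Int) : List (Int × Int) :=
  match fuel with
  | 0 => []
  | fuel + 1 =>
    let remaining := end_ - pos
    if remaining ≤ 0 then []
    else if remaining ≤ max_length then [(pos, end_)]
    else if remaining ≤ 2 * max_length then
      let mid := pos + PySem.Int.floordiv remaining 2
      [(pos, mid), (mid, end_)]
    else
      (pos, pos + max_length) :: subRunLoopA fuel (pos + max_length) end_ max_length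

def subdivide_run_py (start : Int) (end_ : Int) (max_length : Int) : List (Int × Int) :=
  subRunLoopA ((end_ - start).toNat + 1) start end_ max_length

-- ===== PORT B =====
def subdivide_run_py_alt (start : Int) (end_ : Int) (max_length : Int) : List (Int × Int) :=
  let length := end_ - start
  if length ≤ 0 then []
  else if length ≤ max_length then [(start, end_)]
  else
    let k := PySem.Int.floordiv (length - max_length - 1) max_length
    let chunks := (PySem.List.pyRange 0 k 1).map
      (fun i => (start + i * max_length, start + (i + 1) * max_length))
    let pos := start + k * max_length
    let r := end_ - pos
    let mid := pos + PySem.Int.floordiv r 2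
    chunks ++ [(pos, mid), (mid, end_)]

-- ===== PRECONDITION & SPEC =====
-- Pre_ excludes exactly the inputs (max_length ≤ 0 and start < end_) on which Python A never returns (infinite loop).
def Pre_subdivide_run_py (start : Int) (end_ : Int) (max_length : Int) : Prop :=
  end_ ≤ start ∨ 0 < max_length
instance (start : Int) (end_ : Int) (max_length : Int) : Decidable (Pre_subdivide_run_py start end_ max_length) := by unfold Pre_subdivide_run_py; infer_instance

def pvWitness_subdivide_run_py : Int × Int × Int := (0, 25, 7)

def Spec_subdivide_run_py (start : Int) (end_ : Int) (max_length : Int) (out : List (Int × Int)) : Prop := out = subdivide_run_py_alt start end_ max_length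
instance (start : Int) (end_ : Int) (max_length : Int) (out : List (Int × Int)) : Decidable (Spec_subdivide_run_py start end_ max_length out) := by unfold Spec_subdivide_run_py; infer_instance

-- ===== CLAIM (what is proved, stated in full; the proofs are below) =====
def Claim_equal_subdivide_run_py : Prop := ∀ (start : Int) (end_ : Int) (max_length : Int), Dom_subdivide_run_py start end_ max_length → Pre_subdivide_run_py start end_ max_length → Spec_subdivide_run_py start end_ max_length (subdivide_run_py start end_ max_length)


-- ===== LEMMAS AND PROOFS =====

theorem sub_ediv_self (a b : Int) (h : b ≠ 0) : (a - b) / b = a / b - 1 := by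
  have := Int.add_mul_ediv_right a (-1) h
  simpa [sub_eq_add_neg, neg_mul] using this

-- In the recursive case (remaining > 2*max_length) B satisfies the same unfolding as A's loop.
theorem alt_step (pos end_ m : Int) (hm : 0 < m) (hbig : 2 * m < end_ - pos) :
    subdivide_run_py_alt pos end_ m =
      (pos, pos + m) :: subdivide_run_py_alt (pos + m) end_ m := by
  have h1 : ¬ end_ - pos ≤ 0 := by omega
  have h2 : ¬ end_ - pos ≤ m := by omega
  have h1' : ¬ end_ - (pos + m) ≤ 0 := by omega
  have h2' : ¬ end_ - (pos + m) ≤ m := by omega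
  unfold subdivide_run_py_alt
  simp only [h1, h2, h1', h2', if_false]
  rw [PySem.Int.floordiv_eq_ediv_of_pos hm, PySem.Int.floordiv_eq_ediv_of_pos hm]
  have hkpos : 1 ≤ (end_ - pos - m - 1) / m := by
    rw [Int.le_ediv_iff_mul_le hm]; omega
  have hk' : (end_ - (pos + m) - m - 1) / m = (end_ - pos - m - 1) / m - 1 := by
    have h := sub_ediv_self (end_ - pos - m - 1) m hm.ne'
    have : end_ - (pos + m) - m - 1 = end_ - pos - m - 1 - m := by ring
    rw [this, h]
  set k : Int := (end_ - pos - m - 1) / m with hkdef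
  rw [hk']
  rw [PySem.List.pyRange_one_cons (show (0:Int) < k by omega)]
  simp only [List.map_cons, List.cons_append]
  have hhead : (pos + 0 * m, pos + (0 + 1) * m) = (pos, pos + m) := by norm_num
  rw [hhead]
  congr 1
  have htail : pos + m + (k - 1) * m = pos + k * m := by ring
  rw [htail]
  congr 1
  rw [PySem.List.pyRange_one, PySem.List.pyRange_one]
  have hlen : (k - 1 - 0).toNat = (k - 0 - 1).toNat := by omega
  simp only [List.map_map]
  rw [show (k - (0 + 1)).toNat = (k - 1 - 0).toNat from by omega]
  congr 1
  funext j
  simp only [Function.comp_apply]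
  apply Prod.ext <;> push_cast <;> ring

-- A's loop (with enough fuel) agrees with B everywhere under Pre_ with 0 < m.
theorem loop_eq_alt (m : Int) (hm : 0 < m) (end_ : Int) :
    ∀ (fuel : Nat) (pos : Int), end_ - pos < fuel →
      subRunLoopA fuel pos end_ m = subdivide_run_py_alt pos end_ m := by
  intro fuel
  induction fuel with
  | zero =>
      intro pos h
      simp [subRunLoopA, subdivide_run_py_alt, show end_ - pos ≤ 0 from by omega]
  | succ n ih =>
    intro pos h
    by_cases h0 : end_ - pos ≤ 0
    · simp [subRunLoopA, subdivide_run_py_alt, h0]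
    · by_cases h1 : end_ - pos ≤ m
      · simp [subRunLoopA, subdivide_run_py_alt, h0, h1]
      · by_cases h2 : end_ - pos ≤ 2 * m
        · -- tail case: k = 0 in B
          have hk0 : PySem.Int.floordiv (end_ - pos - m - 1) m = 0 := by
            rw [PySem.Int.floordiv_eq_ediv_of_pos hm]
            exact Int.ediv_eq_zero_of_lt (by omega) (by omega)
          simp only [subRunLoopA, subdivide_run_py_alt, h0, h1, h2, if_false, if_true, hk0]
          norm_num [PySem.List.pyRange_one]
        · rw [alt_step pos end_ m hm (by omega)]
          simp only [subRunLoopA, h0, h1, h2, if_false]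
          rw [ih (pos + m) (by omega)]

-- ===== VERDICT (by name: the statement is the Claim_ definition above) =====
theorem subdivide_run_py_spec : Claim_equal_subdivide_run_py := by
  intro start end_ m _ hpre
  unfold Spec_subdivide_run_py subdivide_run_py
  rcases hpre with h | hm
  · have h0 : end_ - start ≤ 0 := by omega
    cases (end_ - start).toNat + 1 with
    | zero => simp [subRunLoopA, subdivide_run_py_alt, h0]
    | succ n => simp [subRunLoopA, subdivide_run_py_alt, h0]
  · exact loop_eq_alt m hm end_ _ start (by omega)
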